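-- pv_equiv track=rewrite | github.com/kshetrajna12/object-sense | src/object_sense/utils/slots.py | _looks_like_entity_slot
-- ===== SOURCE A (Python) =====
-- def _looks_like_entity_slot(name: str) -> bool:
--     """Heuristic: check if a slot name suggests it should be an entity reference.
--
--     Args:
--         name: The slot name
--
--     Returns:
--         True if the name suggests entity reference semantics
--     """
--     # Common patterns for entity-like slots
--     entity_patterns = (
--         "species",
--         "category",
--         "brand",
--         "manufacturer",
--         "location",
--         "country",
--         "region",
--         "city",
--         "owner",
--         "author",
--         "creator",
--         "seller",
--         "buyer",
--         "parent",
--         "child",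
--         "type",  # careful with this one
--     )
--
--     name_lower = name.lower()
--
--     # Direct match
--     if name_lower in entity_patterns:
--         return True
--
--     # Suffix match (e.g., "parent_category", "primary_species")
--     for pattern in entity_patterns:
--         if name_lower.endswith(f"_{pattern}") or name_lower.endswith(pattern):
--             return True
--
--     return False
-- ===== SOURCE B (Python) =====
-- _ENTITY_PATTERNS = (
--     "species", "category", "brand", "manufacturer", "location", "country",
--     "region", "city", "owner", "author", "creator", "seller", "buyer",
--     "parent", "child", "type",
-- )
-- _SUFFIXES = frozenset(_ENTITY_PATTERNS)
-- _LENGTHS = sorted(set(map(len, _ENTITY_PATTERNS)))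
--
--
-- def _looks_like_entity_slot(name: str) -> bool:
--     """Heuristic: check if a slot name suggests it should be an entity reference."""
--     name_lower = name.lower()
--     # Inverted traversal: walk the name's own suffix slices (one per distinct
--     # pattern length) and test each against the precomputed suffix set.
--     return any(name_lower[-L:] in _SUFFIXES for L in _LENGTHS)
-- ===== Notes on version B (the rewrite author's own statement) =====
-- stated objective: alternative
-- what changed: B inverts the traversal: instead of scanning all 16 patterns with two endswith calls each (plus a direct-match pre-check), it precomputes a frozenset of patterns and the 6 distinct pattern lengths, lowercases the name once, and tests the name's own suffix slice of each distinct length for hash-set membership.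
import Mathlib
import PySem

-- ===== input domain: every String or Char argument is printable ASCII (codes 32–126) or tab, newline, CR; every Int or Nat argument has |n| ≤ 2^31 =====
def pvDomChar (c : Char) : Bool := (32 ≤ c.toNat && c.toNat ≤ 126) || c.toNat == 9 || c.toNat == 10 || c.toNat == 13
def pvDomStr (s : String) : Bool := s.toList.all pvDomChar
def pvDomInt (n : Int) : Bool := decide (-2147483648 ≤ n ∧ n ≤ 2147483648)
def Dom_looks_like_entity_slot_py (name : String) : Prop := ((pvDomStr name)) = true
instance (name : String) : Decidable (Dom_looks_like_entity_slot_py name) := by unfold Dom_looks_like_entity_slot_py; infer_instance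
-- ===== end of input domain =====

-- B replaces A's 16-pattern endswith scan (plus a direct-match pre-check) by an inverted
-- traversal over the name's own suffix slices — one per distinct pattern length, tested
-- against a precomputed suffix set (objective: alternative decomposition).

-- ===== PORT A =====
-- the entity_patterns tuple (identical constant in A and Source B; defined once, used by both ports)
def entityPatternsA : List (List Char) :=
  ["species".toList, "category".toList, "brand".toList, "manufacturer".toList,
   "location".toList, "country".toList, "region".toList, "city".toList,
   "owner".toList, "author".toList, "creator".toList, "seller".toList,
   "buyer".toList, "parent".toList, "child".toList, "type".toList]

def looks_like_entity_slot_py (name : String) : Bool :=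
  let name_lower := PySem.Chars.lower name.toList
  -- direct match: name_lower in entity_patterns
  if name_lower ∈ entityPatternsA then true
  else
    -- for pattern in entity_patterns: if name_lower.endswith("_"+pattern) or name_lower.endswith(pattern)
    entityPatternsA.any (fun pattern =>
      PySem.Chars.endswith name_lower ('_' :: pattern) || PySem.Chars.endswith name_lower pattern)

-- ===== PORT B =====
-- module-level constants of Source B (_SUFFIXES, _LENGTHS)
def suffixesB : PySem.Set (List Char) := PySem.Set.ofList entityPatternsA

def lengthsB : List Nat :=
  PySem.List.sorted (PySem.Set.ofList (entityPatternsA.map List.length)) (fun x => x) false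

def looks_like_entity_slot_py_alt (name : String) : Bool :=
  let name_lower := PySem.Chars.lower name.toList
  lengthsB.any (fun L =>
    PySem.Set.contains suffixesB (PySem.Chars.slice name_lower (some (-(L : Int))) none))

-- ===== PRECONDITION & SPEC =====
def Spec_looks_like_entity_slot_py (name : String) (out : Bool) : Prop := out = looks_like_entity_slot_py_alt name
instance (name : String) (out : Bool) : Decidable (Spec_looks_like_entity_slot_py name out) := by unfold Spec_looks_like_entity_slot_py; infer_instance

-- ===== CLAIM (what is proved, stated in full; the proofs are below) =====
def Claim_equal_looks_like_entity_slot_py : Prop := ∀ (name : String), Dom_looks_like_entity_slot_py name → Spec_looks_like_entity_slot_py name (looks_like_entity_slot_py name)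

-- ===== LEMMAS AND PROOFS =====

-- canonical form both ports are reduced to: some pattern is a suffix of name_lower
def suffAny (nl : List Char) : Bool := entityPatternsA.any (fun p => p.isSuffixOf nl)

theorem portA_eq_suffAny (nl : List Char) :
    (if nl ∈ entityPatternsA then true
     else entityPatternsA.any (fun pattern =>
       PySem.Chars.endswith nl ('_' :: pattern) || PySem.Chars.endswith nl pattern))
    = suffAny nl := by
  unfold suffAny
  split_ifs with h
  · symm
    rw [List.any_eq_true]
    exact ⟨nl, h, by simp [List.isSuffixOf_iff_suffix]⟩
  · apply PySem.List.any_congr_mem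
    intro p _
    unfold PySem.Chars.endswith
    by_cases hs : ('_' :: p).isSuffixOf nl
    · have hp : p.isSuffixOf nl := by
        rw [List.isSuffixOf_iff_suffix] at hs ⊢
        exact (List.suffix_cons '_' p).trans hs
      simp [hs, hp]
    · simp [hs]

theorem lengths_pos : ∀ L ∈ lengthsB, 0 < L := by decide

theorem patterns_len_pos : ∀ p ∈ entityPatternsA, 0 < p.length := by decide

theorem mem_lengths_of_mem_patterns : ∀ p ∈ entityPatternsA, p.length ∈ lengthsB := by decide

theorem portB_eq_suffAny (nl : List Char) :
    (lengthsB.any (fun L =>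
      PySem.Set.contains suffixesB (PySem.Chars.slice nl (some (-(L : Int))) none)))
    = suffAny nl := by
  unfold suffAny
  rw [Bool.eq_iff_iff, List.any_eq_true, List.any_eq_true]
  constructor
  · rintro ⟨L, hL, hc⟩
    have hmem : PySem.Chars.slice nl (some (-(L : Int))) none ∈ entityPatternsA := by
      have := (PySem.Set.mem_ofList entityPatternsA
        (PySem.Chars.slice nl (some (-(L : Int))) none)).mp
      simpa [suffixesB, PySem.Set.contains] using hc
    refine ⟨_, hmem, ?_⟩
    rw [List.isSuffixOf_iff_suffix]
    have hslice : PySem.Chars.slice nl (some (-(L : Int))) none = nl.drop (nl.length - L) :=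
      PySem.List.slice_from_neg_natCast nl L (lengths_pos L hL)
    rw [hslice]
    exact List.drop_suffix _ _
  · rintro ⟨p, hp, hs⟩
    rw [List.isSuffixOf_iff_suffix] at hs
    obtain ⟨t, ht⟩ := hs
    refine ⟨p.length, mem_lengths_of_mem_patterns p hp, ?_⟩
    have hslice : PySem.Chars.slice nl (some (-(p.length : Int))) none
        = nl.drop (nl.length - p.length) :=
      PySem.List.slice_from_neg_natCast nl p.length (patterns_len_pos p hp)
    have hdrop : nl.drop (nl.length - p.length) = p := by
      subst ht
      simp
    rw [hslice, hdrop]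
    have : p ∈ suffixesB := by
      rw [suffixesB]
      exact (PySem.Set.mem_ofList entityPatternsA p).mpr hp
    simpa [PySem.Set.contains] using this

-- ===== VERDICT (by name: the statement is the Claim_ definition above) =====
theorem looks_like_entity_slot_py_spec : Claim_equal_looks_like_entity_slot_py := by
  intro name _
  unfold Spec_looks_like_entity_slot_py looks_like_entity_slot_py looks_like_entity_slot_py_alt
  rw [portA_eq_suffAny, portB_eq_suffAny]
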